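-- pv_equiv track=rewrite | github.com/hdthanhbinh/TetrisPython | utils.py | GetGhostRow
-- ===== SOURCE A (Python) =====
-- def GetGhostRow(grid, tetro, start_row, start_col, rows):
--     row = start_row
--     while True:
--         for n, color in enumerate(tetro):
--             if color > 0:
--                 r = row + n // 4
--                 c = start_col + n % 4
--                 if r >= rows or grid[r * 13 + c] > 0:
--                     return row - 1
--         row += 1
-- ===== SOURCE B (Python) =====
-- def GetGhostRow(grid, tetro, start_row, start_col, rows):
--     best = None
--     for n, color in enumerate(tetro):
--         if color > 0:
--             dr = n // 4
--             c = start_col + n % 4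
--             r = start_row + dr
--             while r < rows and grid[r * 13 + c] <= 0:
--                 r += 1
--             stop = r - dr
--             if best is None or stop < best:
--                 best = stop
--     return best - 1
-- ===== Notes on version B (the rewrite author's own statement) =====
-- stated objective: alternative
-- what changed: Instead of dropping the whole piece row by row and re-checking every filled cell at each row, B scans each filled cell's column downward once to its own stopping row and returns the minimum stopping row minus one.
-- outside the precondition, e.g. on GetGhostRow([2, 2, 2], [2, 2, 0], 0, 2, 1): A returns -1, B raises IndexError
import Mathlib
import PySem

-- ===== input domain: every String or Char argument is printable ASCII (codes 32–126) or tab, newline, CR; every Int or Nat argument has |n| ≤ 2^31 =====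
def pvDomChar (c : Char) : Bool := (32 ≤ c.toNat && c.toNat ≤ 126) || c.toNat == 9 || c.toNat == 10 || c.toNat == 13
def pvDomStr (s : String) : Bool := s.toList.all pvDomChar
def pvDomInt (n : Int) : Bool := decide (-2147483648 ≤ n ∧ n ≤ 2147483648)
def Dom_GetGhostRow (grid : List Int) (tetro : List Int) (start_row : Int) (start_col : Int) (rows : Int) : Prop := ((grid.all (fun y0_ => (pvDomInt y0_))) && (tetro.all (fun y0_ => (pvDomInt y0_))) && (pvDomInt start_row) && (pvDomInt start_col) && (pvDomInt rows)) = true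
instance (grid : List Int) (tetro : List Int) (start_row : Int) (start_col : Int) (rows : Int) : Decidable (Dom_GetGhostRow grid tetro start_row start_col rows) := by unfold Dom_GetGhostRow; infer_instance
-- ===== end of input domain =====

-- B scans each filled cell's column downward once and takes the minimum stopping row,
-- instead of A's dropping the whole piece row by row; equivalence of the return values is proved on Pre_.

-- ===== PORT A =====
-- one pass of A's inner `for n, color in enumerate(tetro)` at the current row:
-- true iff some filled cell returns (r >= rows or grid[r*13+c] > 0)
def pvABlocked (grid : List Int) (start_col rows row : Int) (p : Int × Int) : Bool :=
  decide (0 < p.2) &&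
    (decide (rows ≤ row + PySem.Int.floordiv p.1 4) ||
     decide (0 < PySem.List.pyGetD grid ((row + PySem.Int.floordiv p.1 4) * 13 + (start_col + PySem.Int.mod p.1 4)) 0))

-- A's `while True` loop; fuel only makes the recursion total (Pre_ guarantees it is never exhausted)
def pvALoop (grid tetro : List Int) (start_col rows : Int) : Nat → Int → Int
  | 0, row => row - 1
  | fuel + 1, row =>
    if (PySem.List.enumerate tetro 0).any (pvABlocked grid start_col rows row) then row - 1
    else pvALoop grid tetro start_col rows fuel (row + 1)

def GetGhostRow (grid : List Int) (tetro : List Int) (start_row : Int) (start_col : Int) (rows : Int) : Int :=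
  pvALoop grid tetro start_col rows ((rows - start_row).toNat + 1) start_row

-- ===== PORT B =====
-- B's inner `while r < rows and grid[r*13+c] <= 0: r += 1`
def pvBScan (grid : List Int) (c rows : Int) (r : Int) : Int :=
  if h : r < rows ∧ PySem.List.pyGetD grid (r * 13 + c) 0 ≤ 0 then pvBScan grid c rows (r + 1)
  else r
termination_by (rows - r).toNat
decreasing_by omega

-- B's loop body over `enumerate(tetro)`, carrying the running minimum `best`
def pvBStep (grid : List Int) (start_row start_col rows : Int) (best : Option Int) (p : Int × Int) : Option Int :=
  if 0 < p.2 then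
    let dr := PySem.Int.floordiv p.1 4
    let c := start_col + PySem.Int.mod p.1 4
    let stop := pvBScan grid c rows (start_row + dr) - dr
    match best with
    | none => some stop
    | some b => if stop < b then some stop else some b
  else best

-- `.getD start_row` is unreachable under Pre_ (some tetro cell is filled, so best is some _)
def GetGhostRow_alt (grid : List Int) (tetro : List Int) (start_row : Int) (start_col : Int) (rows : Int) : Int :=
  ((PySem.List.enumerate tetro 0).foldl (pvBStep grid start_row start_col rows) none).getD start_row - 1

-- ===== PRECONDITION & SPEC =====
-- Pre_ excludes: (i) tetro without a positive cell (A loops forever); (ii) inputs where some filled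
-- cell's column scan could compute a flat index outside Python's valid (possibly negative) index range
-- before reaching row `rows` (A or B raises IndexError there, or A returns only by luck of grid
-- contents cutting the scan short of the out-of-range index — see cites).
def Pre_GetGhostRow (grid : List Int) (tetro : List Int) (start_row : Int) (start_col : Int) (rows : Int) : Prop :=
  tetro.any (fun x => decide (0 < x)) = true ∧
  ∀ p ∈ PySem.List.enumerate tetro 0, 0 < p.2 →
    start_row + PySem.Int.floordiv p.1 4 < rows →
    (-(grid.length : Int) ≤ (start_row + PySem.Int.floordiv p.1 4) * 13 + (start_col + PySem.Int.mod p.1 4)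
     ∧ (rows - 1) * 13 + (start_col + PySem.Int.mod p.1 4) < (grid.length : Int))
instance (grid : List Int) (tetro : List Int) (start_row : Int) (start_col : Int) (rows : Int) : Decidable (Pre_GetGhostRow grid tetro start_row start_col rows) := by unfold Pre_GetGhostRow; infer_instance

def pvWitness_GetGhostRow : List Int × List Int × Int × Int × Int :=
  ([0, 0, 0, 0, 0, 0, 0, 0, 0, 0, 0, 0, 0], [1], 0, 0, 1)

def Spec_GetGhostRow (grid : List Int) (tetro : List Int) (start_row : Int) (start_col : Int) (rows : Int) (out : Int) : Prop := out = GetGhostRow_alt grid tetro start_row start_col rows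
instance (grid : List Int) (tetro : List Int) (start_row : Int) (start_col : Int) (rows : Int) (out : Int) : Decidable (Spec_GetGhostRow grid tetro start_row start_col rows out) := by unfold Spec_GetGhostRow; infer_instance

-- ===== CLAIM (what is proved, stated in full; the proofs are below) =====
def Claim_equal_GetGhostRow : Prop := ∀ (grid : List Int) (tetro : List Int) (start_row : Int) (start_col : Int) (rows : Int), Dom_GetGhostRow grid tetro start_row start_col rows → Pre_GetGhostRow grid tetro start_row start_col rows → Spec_GetGhostRow grid tetro start_row start_col rows (GetGhostRow grid tetro start_row start_col rows)

-- ===== LEMMAS AND PROOFS =====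

-- minimum-update operator used by B's fold: `if stop < b then stop else b`
def pvm (b s : Int) : Int := if s < b then s else b

-- stopping row of a single filled cell p when the piece starts at `row`
def pvStop (grid : List Int) (start_col rows row : Int) (p : Int × Int) : Int :=
  pvBScan grid (start_col + PySem.Int.mod p.1 4) rows (row + PySem.Int.floordiv p.1 4)
    - PySem.Int.floordiv p.1 4

def pvOptMin (l : List Int) : Option Int :=
  match l with
  | [] => none
  | s :: r => some (r.foldl pvm s)

theorem pvBScan_ge (grid : List Int) (c rows r : Int) : r ≤ pvBScan grid c rows r := by
  fun_induction pvBScan <;> omega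

theorem pvStop_ge (grid : List Int) (start_col rows row : Int) (p : Int × Int) :
    row ≤ pvStop grid start_col rows row p := by
  unfold pvStop
  have := pvBScan_ge grid (start_col + PySem.Int.mod p.1 4) rows (row + PySem.Int.floordiv p.1 4)
  omega

theorem pvStop_step (grid : List Int) (start_col rows row : Int) (p : Int × Int) (hp : 0 < p.2) :
    pvStop grid start_col rows row p =
      if pvABlocked grid start_col rows row p = true then row
      else pvStop grid start_col rows (row + 1) p := by
  unfold pvStop pvABlocked
  rw [pvBScan]
  simp only [Bool.and_eq_true, Bool.or_eq_true, decide_eq_true_eq]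
  split_ifs with h1 h2
  · omega
  · have h3 : row + PySem.Int.floordiv p.1 4 + 1 = row + 1 + PySem.Int.floordiv p.1 4 := by ring
    rw [h3]
  · omega
  · omega

theorem pvm_fold_le_init (l : List Int) : ∀ b : Int, l.foldl pvm b ≤ b := by
  induction l with
  | nil => intro b; simp
  | cons x t ih =>
    intro b
    have h := ih (pvm b x)
    have : pvm b x ≤ b := by unfold pvm; split <;> omega
    simp only [List.foldl_cons]; omega

theorem pvm_fold_le_mem (l : List Int) : ∀ b x : Int, x ∈ l → l.foldl pvm b ≤ x := by
  induction l with
  | nil => intro b x hx; cases hx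
  | cons y t ih =>
    intro b x hx
    simp only [List.foldl_cons]
    rcases List.mem_cons.mp hx with h | h
    · subst h
      have h1 := pvm_fold_le_init t (pvm b x)
      have : pvm b x ≤ x := by unfold pvm; split <;> omega
      omega
    · exact ih (pvm b y) x h

theorem pvm_fold_ge (l : List Int) : ∀ b lb : Int, lb ≤ b → (∀ x ∈ l, lb ≤ x) → lb ≤ l.foldl pvm b := by
  induction l with
  | nil => intro b lb hb _; simpa using hb
  | cons y t ih =>
    intro b lb hb hl
    simp only [List.foldl_cons]
    refine ih (pvm b y) lb ?_ (fun x hx => hl x (List.mem_cons_of_mem _ hx))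
    have := hl y (List.mem_cons_self)
    unfold pvm; split <;> omega

-- B's fold with accumulator `some b` is the pvm-fold of the filled cells' stops
theorem pvFold_acc (grid : List Int) (start_col rows row : Int) (L : List (Int × Int)) :
    ∀ b : Int,
      L.foldl (pvBStep grid row start_col rows) (some b) =
        some (((L.filter (fun p => decide (0 < p.2))).map (pvStop grid start_col rows row)).foldl pvm b) := by
  induction L with
  | nil => intro b; simp
  | cons p t ih =>
    intro b
    by_cases hp : 0 < p.2
    · have hstep : pvBStep grid row start_col rows (some b) p
          = some (pvm b (pvStop grid start_col rows row p)) := by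
        simp only [pvBStep, pvStop, pvm, if_pos hp]
        split <;> rfl
      simp only [List.foldl_cons, hstep, List.filter_cons, decide_eq_true hp]
      exact ih (pvm b (pvStop grid start_col rows row p))
    · have hstep : pvBStep grid row start_col rows (some b) p = some b := by
        simp only [pvBStep, if_neg hp]
      simp only [List.foldl_cons, hstep, List.filter_cons]
      rw [if_neg (by simpa using hp)]
      exact ih b

theorem pvFold_none (grid : List Int) (start_col rows row : Int) (L : List (Int × Int)) :
    L.foldl (pvBStep grid row start_col rows) none =
      pvOptMin ((L.filter (fun p => decide (0 < p.2))).map (pvStop grid start_col rows row)) := by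
  induction L with
  | nil => simp [pvOptMin]
  | cons p t ih =>
    by_cases hp : 0 < p.2
    · have hstep : pvBStep grid row start_col rows none p
          = some (pvStop grid start_col rows row p) := by
        simp only [pvBStep, pvStop, if_pos hp]
      simp only [List.foldl_cons, hstep]
      rw [pvFold_acc]
      simp [pvOptMin, hp]
    · have hstep : pvBStep grid row start_col rows none p = none := by
        simp only [pvBStep, if_neg hp]
      simp only [List.foldl_cons, hstep, List.filter_cons]
      rw [if_neg (by simpa using hp)]
      exact ih

-- if some filled cell is blocked at `row`, the minimum of the stops is `row` itself
theorem pvOptMin_blocked (grid : List Int) (start_col rows row : Int) (F : List (Int × Int))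
    (hfill : ∀ p ∈ F, 0 < p.2)
    (q : Int × Int) (hq : q ∈ F) (hqb : pvABlocked grid start_col rows row q = true) :
    pvOptMin (F.map (pvStop grid start_col rows row)) = some row := by
  have hstopq : pvStop grid start_col rows row q = row := by
    rw [pvStop_step grid start_col rows row q (hfill q hq), if_pos hqb]
  cases F with
  | nil => cases hq
  | cons p t =>
    simp only [List.map_cons, pvOptMin, Option.some.injEq]
    have hge : row ≤ (t.map (pvStop grid start_col rows row)).foldl pvm (pvStop grid start_col rows row p) := by
      refine pvm_fold_ge _ _ _ (pvStop_ge _ _ _ _ _) ?_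
      intro x hx
      rcases List.mem_map.mp hx with ⟨r, _, hr⟩
      rw [← hr]; exact pvStop_ge _ _ _ _ _
    have hle : (t.map (pvStop grid start_col rows row)).foldl pvm (pvStop grid start_col rows row p) ≤ row := by
      rcases List.mem_cons.mp hq with h | h
      · rw [← h, hstopq]; exact pvm_fold_le_init _ _
      · have := pvm_fold_le_mem (t.map (pvStop grid start_col rows row))
          (pvStop grid start_col rows row p) (pvStop grid start_col rows row q)
          (List.mem_map.mpr ⟨q, h, rfl⟩)
        omega
    omega

-- if no filled cell is blocked at `row`, every stop from `row` equals the stop from `row + 1`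
theorem pvStops_shift (grid : List Int) (start_col rows row : Int) (F : List (Int × Int))
    (hfill : ∀ p ∈ F, 0 < p.2)
    (hnb : ∀ p ∈ F, pvABlocked grid start_col rows row p = false) :
    F.map (pvStop grid start_col rows row) = F.map (pvStop grid start_col rows (row + 1)) := by
  apply List.map_congr_left
  intro p hp
  rw [pvStop_step grid start_col rows row p (hfill p hp), if_neg (by simp [hnb p hp])]

-- the main invariant: while fuel exceeds the remaining distance to `rows`, A's drop loop
-- from `row` returns (minimum of the filled cells' stops from `row`) - 1
theorem pvMain (grid tetro : List Int) (start_col rows : Int)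
    (hne : (PySem.List.enumerate tetro 0).filter (fun p => decide (0 < p.2)) ≠ []) :
    ∀ (fuel : Nat) (row : Int), (rows - row).toNat < fuel →
      pvALoop grid tetro start_col rows fuel row =
        (pvOptMin (((PySem.List.enumerate tetro 0).filter (fun p => decide (0 < p.2))).map
          (pvStop grid start_col rows row))).getD row - 1 := by
  intro fuel
  induction fuel with
  | zero => intro row h; omega
  | succ fuel ih =>
    intro row hfuel
    set L := PySem.List.enumerate tetro 0 with hL
    set F := L.filter (fun p => decide (0 < p.2)) with hF
    have hfill : ∀ p ∈ F, 0 < p.2 := by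
      intro p hp
      have := List.of_mem_filter hp
      simpa using this
    show (if L.any (pvABlocked grid start_col rows row) then row - 1
          else pvALoop grid tetro start_col rows fuel (row + 1)) = _
    by_cases hany : L.any (pvABlocked grid start_col rows row) = true
    · rw [if_pos hany]
      rcases List.any_eq_true.mp hany with ⟨q, hqL, hqb⟩
      have hqF : q ∈ F := by
        refine List.mem_filter.mpr ⟨hqL, ?_⟩
        have := (Bool.and_eq_true _ _).mp hqb
        simpa using this.1
      rw [pvOptMin_blocked grid start_col rows row F hfill q hqF hqb]
      rfl
    · rw [if_neg hany]
      have hnb : ∀ p ∈ F, pvABlocked grid start_col rows row p = false := by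
        intro p hp
        by_contra hc
        exact hany (List.any_eq_true.mpr ⟨p, List.mem_of_mem_filter hp, by
          simpa using hc⟩)
      -- some filled cell exists and is not blocked, hence row < rows
      obtain ⟨p0, hp0⟩ := List.exists_mem_of_ne_nil F hne
      have hp0fill := hfill p0 hp0
      have hp0nb := hnb p0 hp0
      have hdr0 : 0 ≤ PySem.Int.floordiv p0.1 4 := by
        have hpos : (0:Int) ≤ p0.1 := by
          have hmem : p0 ∈ L := List.mem_of_mem_filter hp0
          rcases (PySem.List.mem_enumerate_iff _ _ _).mp hmem with ⟨k, hk, hpk⟩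
          rw [hpk]; simp
        rw [PySem.Int.floordiv_eq_ediv_of_pos (by norm_num)]
        exact Int.ediv_nonneg hpos (by norm_num)
      have hrow : row < rows := by
        unfold pvABlocked at hp0nb
        simp only [Bool.and_eq_false_iff, Bool.or_eq_false_iff, decide_eq_false_iff_not] at hp0nb
        rcases hp0nb with h | h
        · omega
        · omega
      have hfuel' : (rows - (row + 1)).toNat < fuel := by omega
      rw [ih (row + 1) hfuel']
      rw [pvStops_shift grid start_col rows row F hfill hnb]
      -- both sides are `(pvOptMin S).getD _ - 1` with S nonempty, so the defaults are irrelevant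
      have : ∃ m, pvOptMin (F.map (pvStop grid start_col rows (row + 1))) = some m := by
        cases hFc : F with
        | nil => exact absurd hFc hne
        | cons a t => exact ⟨_, rfl⟩
      rcases this with ⟨m, hm⟩
      rw [hm]
      rfl

-- ===== VERDICT (by name: the statement is the Claim_ definition above) =====
theorem GetGhostRow_spec : Claim_equal_GetGhostRow := by
  intro grid tetro start_row start_col rows _ hpre
  unfold Spec_GetGhostRow GetGhostRow GetGhostRow_alt
  obtain ⟨hany, _⟩ := hpre
  have hne : (PySem.List.enumerate tetro 0).filter (fun p => decide (0 < p.2)) ≠ [] := by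
    rcases List.any_eq_true.mp hany with ⟨x, hx, hxp⟩
    rcases List.mem_iff_getElem.mp hx with ⟨k, hk, hkx⟩
    have hmem : ((0 : Int) + (k : Int), tetro[k]) ∈ PySem.List.enumerate tetro 0 :=
      (PySem.List.mem_enumerate_iff _ _ _).mpr ⟨k, hk, rfl⟩
    intro hnil
    have : ((0 : Int) + (k : Int), tetro[k]) ∈
        (PySem.List.enumerate tetro 0).filter (fun p => decide (0 < p.2)) := by
      refine List.mem_filter.mpr ⟨hmem, ?_⟩
      simp only [decide_eq_true_eq]
      rw [hkx]
      simpa using hxp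
    rw [hnil] at this
    cases this
  rw [pvMain grid tetro start_col rows hne ((rows - start_row).toNat + 1) start_row (by omega)]
  rw [pvFold_none]
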